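-- pv_equiv track=rewrite | github.com/EKarton/Sharded-Google-Photos | sharded_google_photos/backup/diffs_splitter.py | diffs_splitter
-- ===== SOURCE A (Python) =====
-- def diffs_splitter(diffs):
--     """Splits the diffs based on its album and the modifications to them"""
--     result = {}
--
--     for diff in diffs:
--         modifier = diff["modifier"]
--         album_title = diff["album_title"]
--
--         if album_title not in result:
--             result[album_title] = {}
--
--         if modifier not in result[album_title]:
--             result[album_title][modifier] = []
--
--         result[album_title][modifier].append(diff)
--
--     return result
-- ===== SOURCE B (Python) =====
-- def diffs_splitter(diffs):
--     """Splits the diffs based on its album and the modifications to them"""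
--     albums = list(dict.fromkeys(d["album_title"] for d in diffs))
--     return {
--         album: {
--             modifier: [d for d in diffs
--                        if d["album_title"] == album and d["modifier"] == modifier]
--             for modifier in dict.fromkeys(
--                 d["modifier"] for d in diffs if d["album_title"] == album)
--         }
--         for album in albums
--     }
-- ===== Notes on version B (the rewrite author's own statement) =====
-- stated objective: alternative
-- what changed: Replaces the single-pass nested-dict insertion with a distinct-then-filter strategy: first dedupe the album titles (and, per album, the modifiers) in first-appearance order, then build each group's list by filtering the input, instead of mutating nested dicts while iterating.
import Mathlib
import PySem

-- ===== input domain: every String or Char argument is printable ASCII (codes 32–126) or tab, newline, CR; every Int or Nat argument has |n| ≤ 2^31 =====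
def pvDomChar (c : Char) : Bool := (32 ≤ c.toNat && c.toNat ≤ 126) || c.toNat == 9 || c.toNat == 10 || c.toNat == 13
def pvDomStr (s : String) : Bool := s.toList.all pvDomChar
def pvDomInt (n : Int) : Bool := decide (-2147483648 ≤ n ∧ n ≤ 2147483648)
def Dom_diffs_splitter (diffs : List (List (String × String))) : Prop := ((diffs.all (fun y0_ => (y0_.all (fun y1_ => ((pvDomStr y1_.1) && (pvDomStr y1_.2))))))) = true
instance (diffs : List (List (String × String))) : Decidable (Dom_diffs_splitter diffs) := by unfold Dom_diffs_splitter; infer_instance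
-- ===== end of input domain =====

-- B replaces A's one-pass nested-dict insertion by a distinct-then-filter strategy (dedupe album
-- titles, then per album dedupe modifiers and filter the input); alternative algorithm, not faster.


-- ===== PORT A =====
-- diff[k]: total stand-in for Python's d[k] (first match in the association list); where the key
-- is missing Python raises KeyError — those inputs are excluded by Pre_diffs_splitter.
def pvFetch (d : List (String × String)) (k : String) : String :=
  (PySem.Dict.mk d).getD k ""

-- the body of A's for-loop, step for step
def pvAStep (result : PySem.Dict String (PySem.Dict String (List (List (String × String)))))
    (diff : List (String × String)) :
    PySem.Dict String (PySem.Dict String (List (List (String × String)))) :=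
  let modifier := pvFetch diff "modifier"
  let album_title := pvFetch diff "album_title"
  let result :=
    if result.contains album_title then result
    else result.insert album_title PySem.Dict.empty
  let inner := result.getD album_title PySem.Dict.empty
  let inner := if inner.contains modifier then inner else inner.insert modifier []
  result.insert album_title (inner.insert modifier (inner.getD modifier [] ++ [diff]))

def diffs_splitter (diffs : List (List (String × String))) :
    List (String × List (String × List (List (String × String)))) :=
  ((diffs.foldl pvAStep PySem.Dict.empty).items).map (fun p => (p.1, p.2.items))

-- ===== PORT B =====
def diffs_splitter_alt (diffs : List (List (String × String))) :
    List (String × List (String × List (List (String × String)))) :=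
  (PySem.List.dedup (diffs.map (fun d => pvFetch d "album_title"))).map (fun album =>
    (album,
      (PySem.List.dedup
          ((diffs.filter (fun d => pvFetch d "album_title" == album)).map
            (fun d => pvFetch d "modifier"))).map
        (fun modifier =>
          (modifier,
            diffs.filter (fun d =>
              pvFetch d "album_title" == album && pvFetch d "modifier" == modifier)))))

-- ===== PRECONDITION & SPEC =====
-- Pre_ excludes exactly the inputs containing a diff without an "album_title" or "modifier" key,
-- on which A raises KeyError.
def Pre_diffs_splitter (diffs : List (List (String × String))) : Prop :=
  (diffs.all (fun d =>
    (PySem.Dict.mk d).contains "album_title" && (PySem.Dict.mk d).contains "modifier")) = true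
instance (diffs : List (List (String × String))) : Decidable (Pre_diffs_splitter diffs) := by
  unfold Pre_diffs_splitter; infer_instance

def pvWitness_diffs_splitter : (List (List (String × String))) :=
  [[("album_title", "trip"), ("modifier", "+")], [("album_title", "trip"), ("modifier", "-")]]

-- explicit decidable-equality term for the nested output type (instance search hits its size limit)
def pvDecEqOut : DecidableEq (List (String × List (String × List (List (String × String))))) :=
  @instDecidableEqList _ (@instDecidableEqProd _ _ _
    (@instDecidableEqList _ (@instDecidableEqProd _ _ _
      (@instDecidableEqList _ (@instDecidableEqList _ (@instDecidableEqProd _ _ _ _))))))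

def Spec_diffs_splitter (diffs : List (List (String × String))) (out : List (String × List (String × List (List (String × String))))) : Prop := out = diffs_splitter_alt diffs
instance (diffs : List (List (String × String))) (out : List (String × List (String × List (List (String × String))))) : Decidable (Spec_diffs_splitter diffs out) := by
  unfold Spec_diffs_splitter; exact pvDecEqOut out (diffs_splitter_alt diffs)

-- ===== CLAIM (what is proved, stated in full; the proofs are below) =====
def Claim_equal_diffs_splitter : Prop := ∀ (diffs : List (List (String × String))), Dom_diffs_splitter diffs → Pre_diffs_splitter diffs → Spec_diffs_splitter diffs (diffs_splitter diffs)

-- ===== LEMMAS AND PROOFS =====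

-- A's loop body is exactly "append diff to result[album][modifier]", with empty defaults
theorem pvAStep_eq (r : PySem.Dict String (PySem.Dict String (List (List (String × String)))))
    (d : List (String × String)) :
    pvAStep r d = r.modify (pvFetch d "album_title") PySem.Dict.empty
      (fun inner => inner.modify (pvFetch d "modifier") [] (· ++ [d])) := by
  unfold pvAStep
  simp only [PySem.Dict.modify]
  by_cases h1 : r.contains (pvFetch d "album_title")
  · by_cases h2 : (r.getD (pvFetch d "album_title") PySem.Dict.empty).contains (pvFetch d "modifier")
    · simp [h1, h2]
    · rw [Bool.not_eq_true] at h2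
      simp [h1, h2, PySem.Dict.insert_insert_self, PySem.Dict.getD_insert_self,
            PySem.Dict.getD_of_not_contains]
  · rw [Bool.not_eq_true] at h1
    simp [h1, PySem.Dict.getD_insert_self, PySem.Dict.insert_insert_self,
          PySem.Dict.contains_empty, PySem.Dict.getD_of_not_contains]

-- looking one album up in the outer fold = the inner fold over that album's diffs
theorem pv_fold_getD (l : List (List (String × String)))
    (r : PySem.Dict String (PySem.Dict String (List (List (String × String)))))
    (a : String) :
    (l.foldl (fun r d => r.modify (pvFetch d "album_title") PySem.Dict.empty
        (fun inner => inner.modify (pvFetch d "modifier") [] (· ++ [d]))) r).getD a PySem.Dict.empty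
      = (l.filter (fun d => pvFetch d "album_title" == a)).foldl
          (fun inner d => inner.modify (pvFetch d "modifier") [] (· ++ [d]))
          (r.getD a PySem.Dict.empty) := by
  induction l generalizing r with
  | nil => simp
  | cons d l ih =>
    simp only [List.foldl_cons, List.filter_cons]
    rw [ih]
    by_cases h : pvFetch d "album_title" = a
    · simp [h]
    · simp [h, PySem.Dict.getD_modify, Ne.symm h]

-- looking one modifier up in the inner fold = the filtered diffs, in order
theorem pv_inner_getD (l : List (List (String × String)))
    (inn : PySem.Dict String (List (List (String × String)))) (m : String) :
    (l.foldl (fun inner d => inner.modify (pvFetch d "modifier") [] (· ++ [d])) inn).getD m []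
      = inn.getD m [] ++ l.filter (fun d => pvFetch d "modifier" == m) := by
  have h : l.foldl (fun inner d => inner.modify (pvFetch d "modifier") [] (· ++ [d])) inn
      = (l.map (fun d => (pvFetch d "modifier", d))).foldl
          (fun dc p => dc.modify p.1 [] (· ++ [p.2])) inn := by
    rw [List.foldl_map]
  rw [h, PySem.Dict.getD_foldl_modify_append]
  congr 1
  simp [List.filter_map, List.map_map, Function.comp_def]

theorem pv_main (diffs : List (List (String × String))) :
    diffs_splitter diffs = diffs_splitter_alt diffs := by
  unfold diffs_splitter diffs_splitter_alt
  rw [show diffs.foldl pvAStep PySem.Dict.empty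
      = diffs.foldl (fun r d => r.modify (pvFetch d "album_title") PySem.Dict.empty
          (fun inner => inner.modify (pvFetch d "modifier") [] (· ++ [d]))) PySem.Dict.empty from by
    congr 1; funext r d; exact pvAStep_eq r d]
  have hnodupF : (diffs.foldl (fun r d => r.modify (pvFetch d "album_title") PySem.Dict.empty
      (fun inner => inner.modify (pvFetch d "modifier") [] (· ++ [d]))) PySem.Dict.empty).keys.Nodup := by
    apply PySem.Dict.nodup_keys_foldl_modify_key
    simp [PySem.Dict.keys_empty]
  rw [PySem.Dict.items_eq_map_keys _ hnodupF PySem.Dict.empty, List.map_map,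
      PySem.Dict.keys_foldl_modify_key]
  simp only [PySem.Dict.keys_empty, PySem.Set.update_nil_left, PySem.List.dedup_eq_ofList]
  apply List.map_congr_left
  intro a ha
  simp only [Function.comp_def]
  congr 1
  rw [pv_fold_getD, PySem.Dict.getD_empty]
  have hnodupG : ((diffs.filter (fun d => pvFetch d "album_title" == a)).foldl
      (fun inner d => inner.modify (pvFetch d "modifier") [] (· ++ [d])) PySem.Dict.empty).keys.Nodup := by
    apply PySem.Dict.nodup_keys_foldl_modify_key
    simp [PySem.Dict.keys_empty]
  rw [PySem.Dict.items_eq_map_keys _ hnodupG [], PySem.Dict.keys_foldl_modify_key]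
  simp only [PySem.Dict.keys_empty, PySem.Set.update_nil_left]
  apply List.map_congr_left
  intro m hm
  congr 1
  rw [pv_inner_getD, PySem.Dict.getD_empty, List.nil_append, List.filter_filter]
  exact List.filter_congr (fun x _ => by rw [Bool.and_comm])

-- ===== VERDICT (by name: the statement is the Claim_ definition above) =====
theorem diffs_splitter_spec : Claim_equal_diffs_splitter := by
  intro diffs _ _
  unfold Spec_diffs_splitter
  exact pv_main diffs
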